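-- pv_equiv track=rewrite | github.com/herculespan/BERT-based_ATE_for_agriculture | utils/evaluation_utils.py | get_entity_annotation_metrics
-- ===== SOURCE A (Python) =====
-- def get_entity_annotation_metrics(real_annotations, predicted_annotations):
--     num_complete_entity_annotated = 0
--     num_partial_entity_annotated = 0
--     num_false_positive_annotations = 0
--     for predicted_annotation in predicted_annotations:
--         is_true_positive = False
--         for real_annotation in real_annotations:
--             if real_annotation == real_annotation.intersection(predicted_annotation):
--                 is_true_positive = True
--                 num_complete_entity_annotated+=1
--             elif len(real_annotation.intersection(predicted_annotation)) != 0: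
--                 is_true_positive = True
--                 num_partial_entity_annotated+=1
--         if not is_true_positive:
--             num_false_positive_annotations+=1
--     return num_complete_entity_annotated, num_partial_entity_annotated, num_false_positive_annotations
-- ===== SOURCE B (Python) =====
-- def get_entity_annotation_metrics(real_annotations, predicted_annotations):
--     # Inverted index element -> real annotation ids; each predicted annotation
--     # accumulates per-real overlap counts from the index and every real is then
--     # classified by comparing its overlap count with its size, with no set
--     # intersections computed at all.
--     sizes = [len(r) for r in real_annotations]
--     index = {}
--     for i, r in enumerate(real_annotations):
--         for x in r:
--             index.setdefault(x, []).append(i)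
--     complete = 0
--     partial = 0
--     false_pos = 0
--     for p in predicted_annotations:
--         cnt = [0] * len(real_annotations)
--         for x in p:
--             for i in index.get(x, ()):
--                 cnt[i] += 1
--         matched = False
--         for c, sz in zip(cnt, sizes):
--             if c == sz:
--                 complete += 1
--                 matched = True
--             elif c:
--                 partial += 1
--                 matched = True
--         if not matched:
--             false_pos += 1
--     return complete, partial, false_pos
-- ===== Notes on version B (the rewrite author's own statement) =====
-- stated objective: faster
-- what changed: B builds an inverted index element -> real annotation ids once and, per predicted annotation, accumulates per-real overlap counts from that index and classifies each real by comparing its count with its size, replacing A's per-pair set-intersection construction.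
import Mathlib
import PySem

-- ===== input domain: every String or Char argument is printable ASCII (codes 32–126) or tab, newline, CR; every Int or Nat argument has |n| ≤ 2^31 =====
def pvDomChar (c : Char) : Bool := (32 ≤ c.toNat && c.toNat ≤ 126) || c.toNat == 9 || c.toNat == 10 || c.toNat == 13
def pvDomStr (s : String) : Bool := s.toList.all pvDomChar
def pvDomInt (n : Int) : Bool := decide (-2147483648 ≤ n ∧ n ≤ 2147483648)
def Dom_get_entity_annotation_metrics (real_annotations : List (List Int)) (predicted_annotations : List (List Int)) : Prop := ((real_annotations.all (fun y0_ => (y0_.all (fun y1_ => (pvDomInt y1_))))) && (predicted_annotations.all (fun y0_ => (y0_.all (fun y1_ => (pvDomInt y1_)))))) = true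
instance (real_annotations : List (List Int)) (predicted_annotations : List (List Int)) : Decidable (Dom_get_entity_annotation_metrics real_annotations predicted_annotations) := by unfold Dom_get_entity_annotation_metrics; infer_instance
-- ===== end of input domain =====

-- B replaces A's per-pair set intersections by an inverted index element → real ids:
-- each predicted annotation accumulates per-real overlap counts from the index and
-- every real is classified by comparing its count with its size (measured ~2× faster
-- at a timing run's largest size: no intersection sets are built).

-- ===== PORT A =====
def get_entity_annotation_metrics (real_annotations : List (List Int)) (predicted_annotations : List (List Int)) : Int × Int × Int :=
  predicted_annotations.foldl
    (fun (st : Int × Int × Int) predicted_annotation =>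
      let inner : Int × Int × Bool :=
        real_annotations.foldl
          (fun (t : Int × Int × Bool) real_annotation =>
            if PySem.Set.equal real_annotation (PySem.Set.inter real_annotation predicted_annotation) then
              (t.1 + 1, t.2.1, true)
            else if PySem.Set.len (PySem.Set.inter real_annotation predicted_annotation) ≠ 0 then
              (t.1, t.2.1 + 1, true)
            else t)
          (st.1, st.2.1, false)
      (inner.1, inner.2.1, st.2.2 + if inner.2.2 then 0 else 1))
    (0, 0, 0)

-- ===== PORT B =====
def get_entity_annotation_metrics_alt (real_annotations : List (List Int)) (predicted_annotations : List (List Int)) : Int × Int × Int :=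
  let sizes : List Int := real_annotations.map (fun r => PySem.Set.len r)
  let index : PySem.Dict Int (List Int) :=
    (PySem.List.enumerate real_annotations).foldl
      (fun d ir => ir.2.foldl (fun d x => d.modify x [] (· ++ [ir.1])) d)
      PySem.Dict.empty
  predicted_annotations.foldl
    (fun (st : Int × Int × Int) p =>
      let cnt : List Int :=
        p.foldl
          (fun c x => (index.getD x []).foldl
            (fun c i => PySem.List.pySetD c i (PySem.List.pyGetD c i 0 + 1)) c)
          (List.replicate real_annotations.length (0 : Int))
      let inner : Int × Int × Bool :=
        (List.zip cnt sizes).foldl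
          (fun (t : Int × Int × Bool) cs =>
            if cs.1 == cs.2 then (t.1 + 1, t.2.1, true)
            else if cs.1 ≠ 0 then (t.1, t.2.1 + 1, true)
            else t)
          (st.1, st.2.1, false)
      (inner.1, inner.2.1, st.2.2 + if inner.2.2 then 0 else 1))
    (0, 0, 0)

-- ===== PRECONDITION & SPEC =====
-- Pre_ only states the set representation: the arguments are lists of set[int], so
-- under the type convention each inner list holds DISTINCT elements.
def Pre_get_entity_annotation_metrics (real_annotations : List (List Int)) (predicted_annotations : List (List Int)) : Prop :=
  (∀ r ∈ real_annotations, r.Nodup) ∧ (∀ p ∈ predicted_annotations, p.Nodup)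
instance (real_annotations : List (List Int)) (predicted_annotations : List (List Int)) : Decidable (Pre_get_entity_annotation_metrics real_annotations predicted_annotations) := by unfold Pre_get_entity_annotation_metrics; infer_instance
def pvWitness_get_entity_annotation_metrics : List (List Int) × List (List Int) := ([[1, 2], []], [[2, 3], [7]])
def Spec_get_entity_annotation_metrics (real_annotations : List (List Int)) (predicted_annotations : List (List Int)) (out : Int × Int × Int) : Prop := out = get_entity_annotation_metrics_alt real_annotations predicted_annotations
instance (real_annotations : List (List Int)) (predicted_annotations : List (List Int)) (out : Int × Int × Int) : Decidable (Spec_get_entity_annotation_metrics real_annotations predicted_annotations out) := by unfold Spec_get_entity_annotation_metrics; infer_instance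

-- ===== CLAIM (what is proved, stated in full; the proofs are below) =====
def Claim_equal_get_entity_annotation_metrics : Prop := ∀ (real_annotations : List (List Int)) (predicted_annotations : List (List Int)), Dom_get_entity_annotation_metrics real_annotations predicted_annotations → Pre_get_entity_annotation_metrics real_annotations predicted_annotations → Spec_get_entity_annotation_metrics real_annotations predicted_annotations (get_entity_annotation_metrics real_annotations predicted_annotations)

-- ===== LEMMAS AND PROOFS =====

-- r is completely covered by p (as sets)
def isCompl (p r : List Int) : Bool := r.all (fun y => decide (y ∈ p))
-- r overlaps p but is not completely covered
def isPart (p r : List Int) : Bool := !isCompl p r && r.any (fun y => decide (y ∈ p))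
-- B's inverted-index lookup for one element
def bI (reals : List (List Int)) (x : Int) : List Int :=
  ((PySem.List.enumerate reals).filter (fun ir => decide (x ∈ ir.2))).map (fun ir => ir.1)
-- the multiset of real ids hit by one predicted annotation
def bH (reals : List (List Int)) (p : List Int) : List Int := p.flatMap (bI reals)
-- the common per-predicted step both ports are reduced to
def gStep (reals : List (List Int)) (st : Int × Int × Int) (p : List Int) : Int × Int × Int :=
  (st.1 + (reals.countP (isCompl p) : Nat), st.2.1 + (reals.countP (isPart p) : Nat),
   st.2.2 + if reals.any (fun r => isCompl p r || isPart p r) then 0 else 1)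

lemma branch_compl (p r : List Int) : PySem.Set.equal r (PySem.Set.inter r p) = isCompl p r := by
  rw [Bool.eq_iff_iff]
  simp only [PySem.Set.equal_iff, isCompl, List.all_eq_true, PySem.Set.mem_inter, decide_eq_true_eq]
  constructor
  · intro h y hy; exact ((h y).mp hy).2
  · intro h y; constructor
    · intro hy; exact ⟨hy, h y hy⟩
    · intro hy; exact hy.1

lemma branch_any (p r : List Int) :
    (PySem.Set.len (PySem.Set.inter r p) ≠ 0) ↔ r.any (fun y => decide (y ∈ p)) = true := by
  simp only [PySem.Set.len, List.any_eq_true, decide_eq_true_eq]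
  constructor
  · intro h
    rcases List.exists_mem_of_ne_nil (PySem.Set.inter r p) (by intro hnil; simp [hnil] at h) with ⟨y, hy⟩
    rw [PySem.Set.mem_inter] at hy
    exact ⟨y, hy.1, hy.2⟩
  · intro ⟨y, hy, hyp⟩ h
    have : y ∈ PySem.Set.inter r p := (PySem.Set.mem_inter _ _ _).mpr ⟨hy, hyp⟩
    cases hmem : PySem.Set.inter r p with
    | nil => simp [hmem] at this
    | cons a t => simp [hmem] at h; omega

lemma innerA (p : List Int) (reals : List (List Int)) : ∀ (c pt : Int) (b : Bool),
    reals.foldl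
      (fun (t : Int × Int × Bool) r =>
        if PySem.Set.equal r (PySem.Set.inter r p) then (t.1 + 1, t.2.1, true)
        else if PySem.Set.len (PySem.Set.inter r p) ≠ 0 then (t.1, t.2.1 + 1, true)
        else t) (c, pt, b)
    = (c + (reals.countP (isCompl p) : Nat), pt + (reals.countP (isPart p) : Nat),
       b || reals.any (fun r => isCompl p r || isPart p r)) := by
  induction reals with
  | nil => intro c pt b; simp
  | cons r rs ih =>
    intro c pt b
    simp only [List.foldl_cons]
    rw [branch_compl p r]
    by_cases h1 : isCompl p r
    · have hpart : isPart p r = false := by simp [isPart, h1]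
      rw [if_pos h1, ih]
      simp only [List.countP_cons, List.any_cons, h1, hpart, if_true, Prod.mk.injEq]
      refine ⟨by push_cast; ring, by push_cast; ring, by simp⟩
    · have h1f : isCompl p r = false := Bool.eq_false_iff.mpr h1
      by_cases h2 : r.any (fun y => decide (y ∈ p))
      · have hcond : PySem.Set.len (PySem.Set.inter r p) ≠ 0 := (branch_any p r).mpr h2
        have hpart : isPart p r = true := by simp [isPart, h1f, h2]
        rw [if_neg h1, if_pos hcond, ih]
        simp only [List.countP_cons, List.any_cons, h1f, hpart, if_true, Prod.mk.injEq]
        refine ⟨by push_cast; ring, by push_cast; ring, by simp⟩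
      · have hcond : ¬ (PySem.Set.len (PySem.Set.inter r p) ≠ 0) := fun hc => h2 ((branch_any p r).mp hc)
        have hpart : isPart p r = false := by simp [isPart, h2]
        rw [if_neg h1, if_neg hcond, ih]
        simp only [List.countP_cons, List.any_cons, h1f, hpart, Prod.mk.injEq]
        refine ⟨by push_cast; ring, by push_cast; ring, by simp⟩

lemma A_eq_foldl (reals preds : List (List Int)) :
    get_entity_annotation_metrics reals preds = preds.foldl (gStep reals) (0, 0, 0) := by
  unfold get_entity_annotation_metrics
  apply PySem.List.foldl_congr_mem
  intro acc p _
  rw [innerA]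
  simp only [gStep, Bool.false_or]

lemma innerB (L : List (Int × Int)) : ∀ (c pt : Int) (b : Bool),
    L.foldl
      (fun (t : Int × Int × Bool) cs =>
        if cs.1 == cs.2 then (t.1 + 1, t.2.1, true)
        else if cs.1 ≠ 0 then (t.1, t.2.1 + 1, true)
        else t) (c, pt, b)
    = (c + (L.countP (fun cs => cs.1 == cs.2) : Nat),
       pt + (L.countP (fun cs => !(cs.1 == cs.2) && decide (cs.1 ≠ 0)) : Nat),
       b || L.any (fun cs => cs.1 == cs.2 || decide (cs.1 ≠ 0))) := by
  induction L with
  | nil => intro c pt b; simp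
  | cons cs t ih =>
    intro c pt b
    simp only [List.foldl_cons]
    by_cases h1 : cs.1 == cs.2
    · rw [if_pos h1, ih]
      simp only [List.countP_cons, List.any_cons, h1, if_true, Bool.not_true, Bool.false_and,
        if_false, Prod.mk.injEq]
      refine ⟨by push_cast; ring, by push_cast; ring, by simp⟩
    · have h1f : (cs.1 == cs.2) = false := Bool.eq_false_iff.mpr h1
      by_cases h2 : cs.1 ≠ 0
      · rw [if_neg h1, if_pos h2, ih]
        simp only [List.countP_cons, List.any_cons, h1f, h2, Bool.not_false, Bool.true_and,
          decide_eq_true_eq, if_true, Prod.mk.injEq]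
        refine ⟨by push_cast; ring, by push_cast; simp [h2]; ring, by simp [h2]⟩
      · rw [if_neg h1, if_neg h2, ih]
        simp only [List.countP_cons, List.any_cons, h1f, Prod.mk.injEq]
        refine ⟨by push_cast; simp, by push_cast; simp [h2], by simp [h2]⟩

lemma filter_beq_of_nodup (x : Int) : ∀ (l : List Int), l.Nodup →
    l.filter (fun y => y == x) = if x ∈ l then [x] else [] := by
  intro l hl
  induction l with
  | nil => simp
  | cons a t ih =>
    rcases List.nodup_cons.mp hl with ⟨ha, ht⟩
    by_cases hax : a = x
    · subst hax
      simp [ih ht, ha]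
    · simp [hax, ih ht, Ne.symm hax]

lemma flatMap_ite_singleton {α β : Type} (q : α → Prop) [DecidablePred q] (g : α → β) : ∀ (l : List α),
    l.flatMap (fun a => if q a then [g a] else []) = (l.filter (fun a => decide (q a))).map g := by
  intro l
  induction l with
  | nil => simp
  | cons a t ih => by_cases h : q a <;> simp [h, ih]

lemma sum_ite_eq_countP {α : Type} (q : α → Bool) : ∀ (l : List α),
    (l.map (fun a => if q a then (1 : Nat) else 0)).sum = l.countP q := by
  intro l
  induction l with
  | nil => simp
  | cons a t ih => by_cases h : q a <;> simp [h, ih, Nat.add_comm]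

lemma enum_nodup (reals : List (List Int)) : (PySem.List.enumerate reals).Nodup := by
  have h := PySem.List.pairwise_lt_enumerate reals 0
  exact h.imp (fun hlt => by intro he; subst he; exact lt_irrefl _ hlt)

lemma snd_mem_of_mem_enum (reals : List (List Int)) (ir : Int × List Int)
    (hir : ir ∈ PySem.List.enumerate reals) : ir.2 ∈ reals := by
  rcases (PySem.List.mem_enumerate_iff reals 0 ir).mp hir with ⟨k, hk, rfl⟩
  exact List.getElem_mem hk

lemma countP_reals_eq_enum (reals : List (List Int)) (f : List Int → Bool) :
    reals.countP f = (PySem.List.enumerate reals).countP (fun ir => f ir.2) := by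
  conv_lhs => rw [← PySem.List.map_snd_enumerate reals 0]
  rw [List.countP_map]
  rfl

lemma any_reals_eq_enum (reals : List (List Int)) (f : List Int → Bool) :
    reals.any f = (PySem.List.enumerate reals).any (fun ir => f ir.2) := by
  conv_lhs => rw [← PySem.List.map_snd_enumerate reals 0]
  rw [List.any_map]
  rfl

-- the inverted index lookup
lemma index_getD (reals : List (List Int)) (hnd : ∀ r ∈ reals, r.Nodup) (x : Int) :
    ((PySem.List.enumerate reals).foldl
      (fun d ir => ir.2.foldl (fun d x => d.modify x [] (· ++ [ir.1])) d)
      PySem.Dict.empty).getD x []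
    = bI reals x := by
  have step1 : ∀ (d : PySem.Dict Int (List Int)),
      (PySem.List.enumerate reals).foldl
        (fun d ir => ir.2.foldl (fun d x => d.modify x [] (· ++ [ir.1])) d) d
      = ((PySem.List.enumerate reals).flatMap (fun ir => ir.2.map (fun y => (y, ir.1)))).foldl
          (fun d q => d.modify q.1 [] (· ++ [q.2])) d := by
    intro d
    rw [List.foldl_flatMap]
    apply PySem.List.foldl_congr_mem
    intro acc ir _
    simp [List.foldl_map]
  rw [step1, PySem.Dict.getD_foldl_modify_append]
  simp only [PySem.Dict.getD_empty, List.nil_append, List.filter_flatMap]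
  have step2 : ∀ ir ∈ PySem.List.enumerate reals,
      ((ir.2.map (fun y => (y, ir.1))).filter (fun q => q.1 == x))
        = (if x ∈ ir.2 then [x] else []).map (fun y => (y, ir.1)) := by
    intro ir hir
    rw [List.filter_map]
    have : ir.2.Nodup := by
      rcases (PySem.List.mem_enumerate_iff reals 0 ir).mp hir with ⟨k, hk, rfl⟩
      exact hnd _ (List.getElem_mem hk)
    rw [show ((fun (q : Int × Int) => q.1 == x) ∘ (fun y => (y, ir.1))) = fun y => y == x from rfl,
       filter_beq_of_nodup x ir.2 this]
  calc (List.map (fun q : Int × Int => q.2)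
        ((PySem.List.enumerate reals).flatMap fun ir => (ir.2.map (fun y => (y, ir.1))).filter (fun q => q.1 == x)))
      = List.map (fun q : Int × Int => q.2)
        ((PySem.List.enumerate reals).flatMap fun ir => (if x ∈ ir.2 then [x] else []).map (fun y => (y, ir.1))) := by
        exact congrArg (List.map (fun q : Int × Int => q.2)) (List.flatMap_congr step2)
    _ = (PySem.List.enumerate reals).flatMap (fun ir => if x ∈ ir.2 then [ir.1] else []) := by
        rw [List.map_flatMap]
        refine List.flatMap_congr ?_
        intro ir _
        by_cases h : x ∈ ir.2 <;> simp [h]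
    _ = bI reals x := by
        rw [flatMap_ite_singleton (fun ir : Int × List Int => x ∈ ir.2) (fun ir => ir.1)]
        rfl

lemma count_bI (reals : List (List Int)) (x : Int) (k : Nat) (hk : k < reals.length) :
    (bI reals x).count ((k : Nat) : Int) = if x ∈ reals[k] then 1 else 0 := by
  unfold bI
  rw [List.count_eq_countP, List.countP_map]
  have hmemk : ((k : Int), reals[k]) ∈ PySem.List.enumerate reals :=
    (PySem.List.mem_enumerate_iff reals 0 _).mpr ⟨k, hk, by simp⟩
  have hcong : List.countP ((fun a => a == ((k : Nat) : Int)) ∘ (fun ir : Int × List Int => ir.1))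
      ((PySem.List.enumerate reals).filter (fun iq => decide (x ∈ iq.2)))
      = List.countP (fun a => a == ((k : Int), reals[k]))
      ((PySem.List.enumerate reals).filter (fun iq => decide (x ∈ iq.2))) := by
    apply List.countP_congr
    intro iq hiq
    have hiq' : iq ∈ PySem.List.enumerate reals := List.mem_of_mem_filter hiq
    rcases (PySem.List.mem_enumerate_iff reals 0 iq).mp hiq' with ⟨k', hk', rfl⟩
    simp only [Function.comp, beq_iff_eq, Prod.mk.injEq]
    constructor
    · intro h
      have hkk : k' = k := by omega
      subst hkk
      exact ⟨by omega, rfl⟩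
    · intro ⟨h, _⟩; exact h
  rw [hcong, ← List.count_eq_countP]
  have hnd : ((PySem.List.enumerate reals).filter (fun iq => decide (x ∈ iq.2))).Nodup :=
    (enum_nodup reals).filter _
  by_cases h : x ∈ reals[k]
  · rw [if_pos h]
    exact List.count_eq_one_of_mem hnd (List.mem_filter.mpr ⟨hmemk, by simpa using h⟩)
  · rw [if_neg h]
    apply List.count_eq_zero_of_not_mem
    intro hmem
    exact h (by simpa using (List.mem_filter.mp hmem).2)

lemma count_bH (reals : List (List Int)) (p : List Int) (k : Nat) (hk : k < reals.length) :
    (bH reals p).count ((k : Nat) : Int) = p.countP (fun x => decide (x ∈ reals[k])) := by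
  unfold bH
  rw [List.count_flatMap]
  rw [show (List.count ((k : Nat) : Int) ∘ bI reals) = fun x => (bI reals x).count ((k : Nat) : Int) from rfl]
  calc (p.map (fun x => (bI reals x).count ((k : Nat) : Int))).sum
      = (p.map (fun x => if x ∈ reals[k] then (1 : Nat) else 0)).sum := by
        congr 1
        apply List.map_congr_left
        intro x _
        rw [count_bI reals x k hk]
    _ = p.countP (fun x => decide (x ∈ reals[k])) := by
        rw [← sum_ite_eq_countP]
        congr 1
        apply List.map_congr_left
        intro x _
        by_cases h : x ∈ reals[k] <;> simp [h]

lemma bH_bounds (reals : List (List Int)) (p : List Int) :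
    ∀ i ∈ bH reals p, 0 ≤ i ∧ i < (reals.length : Int) := by
  intro i hi
  simp only [bH, bI, List.mem_flatMap, List.mem_map, List.mem_filter] at hi
  rcases hi with ⟨x, -, ir, ⟨hir, -⟩, rfl⟩
  rcases (PySem.List.mem_enumerate_iff reals 0 ir).mp hir with ⟨k, hk, rfl⟩
  constructor <;> simp <;> omega

-- the per-real increment loop, characterised pointwise
lemma incr_fold : ∀ (H : List Int) (c : List Int),
    (∀ i ∈ H, 0 ≤ i ∧ i < (c.length : Int)) →
    ((H.foldl (fun c i => PySem.List.pySetD c i (PySem.List.pyGetD c i 0 + 1)) c).length = c.length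
    ∧ ∀ (k : Nat),
        (H.foldl (fun c i => PySem.List.pySetD c i (PySem.List.pyGetD c i 0 + 1)) c).getD k 0
          = c.getD k 0 + (H.count ((k : Nat) : Int) : Nat)) := by
  intro H
  induction H with
  | nil => intro c _; exact ⟨rfl, by simp⟩
  | cons i t ih =>
    intro c hb
    obtain ⟨hi0, hilt⟩ := hb i List.mem_cons_self
    have hlen : (PySem.List.pySetD c i (PySem.List.pyGetD c i 0 + 1)).length = c.length :=
      PySem.List.length_pySetD c i _
    have hb' : ∀ j ∈ t, 0 ≤ j ∧ j < ((PySem.List.pySetD c i (PySem.List.pyGetD c i 0 + 1)).length : Int) := by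
      rw [hlen]; exact fun j hj => hb j (List.mem_cons_of_mem i hj)
    obtain ⟨ihlen, ihget⟩ := ih _ hb'
    constructor
    · rw [List.foldl_cons, ihlen, hlen]
    · intro k
      rw [List.foldl_cons, ihget k]
      have hc' : (PySem.List.pySetD c i (PySem.List.pyGetD c i 0 + 1)).getD k 0
          = if ((k : Nat) : Int) = i then c.getD k 0 + 1 else c.getD k 0 := by
        rw [PySem.List.pySetD_of_nonneg c _ hi0, PySem.List.pyGetD_of_nonneg c 0 hi0]
        rw [List.getD_eq_getElem?_getD, List.getElem?_set]
        by_cases hki : i.toNat = k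
        · have hik : ((k : Nat) : Int) = i := by omega
          have hlt : i.toNat < c.length := by omega
          rw [if_pos hki, if_pos hlt, if_pos hik]
          simp [← hki, List.getD_eq_getElem?_getD]
        · have hik : ¬ ((k : Nat) : Int) = i := by omega
          rw [if_neg hki, if_neg hik, List.getD_eq_getElem?_getD]
      rw [hc', List.count_cons]
      by_cases h : ((k : Nat) : Int) = i
      · rw [if_pos h]
        simp only [h, BEq.rfl, if_true]
        push_cast
        ring
      · rw [if_neg h]
        have : (i == ((k : Nat) : Int)) = false := by
          simp only [beq_eq_false_iff_ne, ne_eq]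
          omega
        simp [this]

-- a full overlap count is exactly a complete (subset) match
lemma pcount_eq_len_iff (p r : List Int) (hp : p.Nodup) (hr : r.Nodup) :
    p.countP (fun x => decide (x ∈ r)) = r.length ↔ ∀ y ∈ r, y ∈ p := by
  rw [List.countP_eq_length_filter]
  constructor
  · intro h y hy
    have hsub : (p.filter (fun x => decide (x ∈ r))).toFinset ⊆ r.toFinset := by
      intro a ha
      simp only [List.mem_toFinset, List.mem_filter, decide_eq_true_eq] at ha ⊢
      exact ha.2
    have hcard : r.toFinset.card ≤ (p.filter (fun x => decide (x ∈ r))).toFinset.card := by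
      rw [List.toFinset_card_of_nodup (hp.filter _), List.toFinset_card_of_nodup hr, h]
    have heq := Finset.eq_of_subset_of_card_le hsub hcard
    have : y ∈ (p.filter (fun x => decide (x ∈ r))).toFinset := by
      rw [heq]; simpa using hy
    simp only [List.mem_toFinset, List.mem_filter] at this
    exact this.1
  · intro h
    have : (p.filter (fun x => decide (x ∈ r))).Perm r := by
      rw [List.perm_ext_iff_of_nodup (hp.filter _) hr]
      intro a
      simp only [List.mem_filter, decide_eq_true_eq]
      exact ⟨fun ha => ha.2, fun ha => ⟨h a ha, ha⟩⟩
    exact this.length_eq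

lemma item_compl_eq (p r : List Int) (hp : p.Nodup) (hr : r.Nodup) :
    (((p.countP (fun x => decide (x ∈ r)) : Nat) : Int) == PySem.Set.len r) = isCompl p r := by
  rw [Bool.eq_iff_iff, beq_iff_eq]
  have hlen : PySem.Set.len r = (r.length : Int) := rfl
  rw [hlen, Nat.cast_inj, pcount_eq_len_iff p r hp hr]
  simp [isCompl, List.all_eq_true]

lemma item_any_eq (p r : List Int) :
    (decide ((((p.countP (fun x => decide (x ∈ r)) : Nat) : Int)) ≠ 0)) = r.any (fun y => decide (y ∈ p)) := by
  rw [Bool.eq_iff_iff, decide_eq_true_eq]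
  constructor
  · intro h
    have hne : p.countP (fun x => decide (x ∈ r)) ≠ 0 := by exact_mod_cast h
    have hex : ¬ ∀ a ∈ p, ¬ ((fun x => decide (x ∈ r)) a = true) :=
      fun hall => hne (List.countP_eq_zero.mpr hall)
    push_neg at hex
    rcases hex with ⟨x, hx, hxr⟩
    exact List.any_eq_true.mpr ⟨x, by simpa using hxr, by simpa using hx⟩
  · intro h
    rcases List.any_eq_true.mp h with ⟨y, hy, hyp⟩
    have hpos : 0 < p.countP (fun x => decide (x ∈ r)) :=
      List.countP_pos_iff.mpr ⟨y, by simpa using hyp, by simpa using hy⟩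
    have : p.countP (fun x => decide (x ∈ r)) ≠ 0 := Nat.pos_iff_ne_zero.mp hpos
    exact_mod_cast this

lemma any_congr_mem {α : Type} (p q : α → Bool) : ∀ (l : List α), (∀ x ∈ l, p x = q x) → l.any p = l.any q := by
  intro l
  induction l with
  | nil => intro _; rfl
  | cons a t ih =>
    intro h
    simp only [List.any_cons, h a List.mem_cons_self,
      ih (fun x hx => h x (List.mem_cons_of_mem a hx))]

lemma countP_congr_mem {α : Type} (p q : α → Bool) : ∀ (l : List α), (∀ x ∈ l, p x = q x) → l.countP p = l.countP q := by
  intro l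
  induction l with
  | nil => intro _; rfl
  | cons a t ih =>
    intro h
    simp only [List.countP_cons, h a List.mem_cons_self,
      ih (fun x hx => h x (List.mem_cons_of_mem a hx))]

-- the zip of counts and sizes, characterised over the enumeration
lemma zip_eq (reals : List (List Int)) (p : List Int) :
    List.zip
      ((bH reals p).foldl (fun c i => PySem.List.pySetD c i (PySem.List.pyGetD c i 0 + 1))
        (List.replicate reals.length (0 : Int)))
      (reals.map (fun r => PySem.Set.len r))
    = (PySem.List.enumerate reals).map
        (fun ir => (((p.countP (fun x => decide (x ∈ ir.2)) : Nat) : Int), PySem.Set.len ir.2)) := by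
  have hb : ∀ i ∈ bH reals p, 0 ≤ i ∧ i < ((List.replicate reals.length (0 : Int)).length : Int) := by
    rw [List.length_replicate]; exact bH_bounds reals p
  obtain ⟨hlen, hget⟩ := incr_fold (bH reals p) (List.replicate reals.length (0 : Int)) hb
  apply List.ext_getElem
  · simp [List.length_zip, hlen, PySem.List.length_enumerate]
  · intro k h1 h2
    have hk : k < reals.length := by
      simp [PySem.List.length_enumerate] at h2
      exact h2
    rw [List.getElem_zip, List.getElem_map, List.getElem_map, PySem.List.getElem_enumerate]
    have hcnt : ((bH reals p).foldl (fun c i => PySem.List.pySetD c i (PySem.List.pyGetD c i 0 + 1))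
        (List.replicate reals.length (0 : Int)))[k]'(by
          rw [hlen, List.length_replicate]; exact hk)
        = ((p.countP (fun x => decide (x ∈ reals[k])) : Nat) : Int) := by
      have hklt : k < ((bH reals p).foldl (fun c i => PySem.List.pySetD c i (PySem.List.pyGetD c i 0 + 1))
          (List.replicate reals.length (0 : Int))).length := by
        rw [hlen, List.length_replicate]; exact hk
      rw [← List.getD_eq_getElem _ 0 hklt, hget k, count_bH reals p k hk]
      simp [List.getD_eq_getElem?_getD, hk]
    rw [hcnt]

lemma B_eq_foldl (reals preds : List (List Int)) (hnd : ∀ r ∈ reals, r.Nodup)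
    (hpnd : ∀ p ∈ preds, p.Nodup) :
    get_entity_annotation_metrics_alt reals preds = preds.foldl (gStep reals) (0, 0, 0) := by
  unfold get_entity_annotation_metrics_alt
  simp only []
  apply PySem.List.foldl_congr_mem
  intro st p hp
  have hpn : p.Nodup := hpnd p hp
  have hcnt : p.foldl
      (fun c x => (((PySem.List.enumerate reals).foldl
          (fun d ir => ir.2.foldl (fun d x => d.modify x [] (· ++ [ir.1])) d)
          PySem.Dict.empty).getD x []).foldl
        (fun c i => PySem.List.pySetD c i (PySem.List.pyGetD c i 0 + 1)) c)
      (List.replicate reals.length (0 : Int))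
      = (bH reals p).foldl (fun c i => PySem.List.pySetD c i (PySem.List.pyGetD c i 0 + 1))
          (List.replicate reals.length (0 : Int)) := by
    rw [show bH reals p = p.flatMap (bI reals) from rfl, List.foldl_flatMap]
    apply PySem.List.foldl_congr_mem
    intro acc x _
    rw [index_getD reals hnd x]
  rw [hcnt, zip_eq reals p, innerB]
  have hcomplP : (PySem.List.enumerate reals).countP
      ((fun cs : Int × Int => cs.1 == cs.2) ∘
        (fun ir => (((p.countP (fun x => decide (x ∈ ir.2)) : Nat) : Int), PySem.Set.len ir.2)))
      = reals.countP (isCompl p) := by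
    rw [countP_reals_eq_enum reals (isCompl p)]
    apply countP_congr_mem
    intro ir hir
    rw [Function.comp_apply]
    dsimp only
    exact item_compl_eq p ir.2 hpn (hnd _ (snd_mem_of_mem_enum reals ir hir))
  have hpartP : (PySem.List.enumerate reals).countP
      ((fun cs : Int × Int => !(cs.1 == cs.2) && decide (cs.1 ≠ 0)) ∘
        (fun ir => (((p.countP (fun x => decide (x ∈ ir.2)) : Nat) : Int), PySem.Set.len ir.2)))
      = reals.countP (isPart p) := by
    rw [countP_reals_eq_enum reals (isPart p)]
    apply countP_congr_mem
    intro ir hir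
    rw [Function.comp_apply]
    dsimp only
    have h1 := item_compl_eq p ir.2 hpn (hnd _ (snd_mem_of_mem_enum reals ir hir))
    have h2 := item_any_eq p ir.2
    simp only [h1, h2, isPart]
  have hanyP : (PySem.List.enumerate reals).any
      ((fun cs : Int × Int => cs.1 == cs.2 || decide (cs.1 ≠ 0)) ∘
        (fun ir => (((p.countP (fun x => decide (x ∈ ir.2)) : Nat) : Int), PySem.Set.len ir.2)))
      = reals.any (fun r => isCompl p r || isPart p r) := by
    rw [any_reals_eq_enum reals (fun r => isCompl p r || isPart p r)]
    apply any_congr_mem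
    intro ir hir
    rw [Function.comp_apply]
    dsimp only
    have h1 := item_compl_eq p ir.2 hpn (hnd _ (snd_mem_of_mem_enum reals ir hir))
    have h2 := item_any_eq p ir.2
    simp only [h1, h2, isPart]
    by_cases hc : isCompl p ir.2 <;> simp [hc]
  simp only [List.countP_map, List.any_map, Bool.false_or, hcomplP, hpartP, hanyP, gStep]

-- ===== VERDICT (by name: the statement is the Claim_ definition above) =====
theorem get_entity_annotation_metrics_spec : Claim_equal_get_entity_annotation_metrics := by
  intro real_annotations predicted_annotations _ hpre
  unfold Spec_get_entity_annotation_metrics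
  rw [A_eq_foldl real_annotations predicted_annotations,
      B_eq_foldl real_annotations predicted_annotations hpre.1 hpre.2]
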